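-- pv_equiv track=rewrite | github.com/wkabrich/AdventOfCode | 2015/05/main.py | validate2
-- ===== SOURCE A (Python) =====
-- def validate2(word):
--     pairPairsCount = 0
--     repeatWithGapCount = 0
--
--     # find the pairs of pairs
--     for i in range(len(word) - 1):
--         isub = word[i:i + 2]
--         remainingWord = word[i + 2:]
--
--         for j in range(len(remainingWord) - 1):
--             jsub = remainingWord[j:j + 2]
--
--             if isub == jsub:
--                 pairPairsCount += 1
--
--     # find the repeats with gaps
--     for i in range(len(word) - 2):
--         if word[i] == word[i + 2]:
--             repeatWithGapCount += 1
--
--     if pairPairsCount and repeatWithGapCount: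
--         return 1
--     else:
--         return 0
-- ===== SOURCE B (Python) =====
-- def validate2(word):
--     n = len(word)
--     seen = set()
--     has_pair = False
--     has_gap = False
--     for i in range(n - 1):
--         if i >= 2:
--             seen.add(word[i - 2:i])
--         if word[i:i + 2] in seen:
--             has_pair = True
--         if i + 2 < n and word[i] == word[i + 2]:
--             has_gap = True
--     return 1 if has_pair and has_gap else 0
-- ===== Notes on version B (the rewrite author's own statement) =====
-- stated objective: faster
-- what changed: Replaces A's nested rescans of all later pairs by a single left-to-right pass that maintains a set of the two-letter pairs ending at least two positions back and fuses the gap-repeat check into the same loop.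
import Mathlib
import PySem

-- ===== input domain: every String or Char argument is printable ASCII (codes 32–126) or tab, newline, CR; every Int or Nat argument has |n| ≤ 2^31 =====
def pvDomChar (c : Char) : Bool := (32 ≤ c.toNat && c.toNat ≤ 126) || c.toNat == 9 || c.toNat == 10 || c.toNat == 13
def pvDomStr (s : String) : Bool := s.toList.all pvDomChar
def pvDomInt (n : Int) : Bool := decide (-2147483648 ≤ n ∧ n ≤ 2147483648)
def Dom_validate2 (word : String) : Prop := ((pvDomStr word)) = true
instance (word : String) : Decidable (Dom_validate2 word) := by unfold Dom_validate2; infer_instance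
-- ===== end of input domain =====

-- B replaces A's nested rescan of all later pairs by a single pass keeping a set of the pairs ending at least two positions back (objective: faster).

-- ===== PORT A =====
def validate2 (word : String) : Int :=
  let cs := word.toList
  let n : Int := cs.length
  let pairPairsCount : Int :=
    (PySem.List.pyRange 0 (n - 1)).foldl (fun acc i =>
      let isub := PySem.List.slice cs (some i) (some (i + 2))
      let remainingWord := PySem.List.slice cs (some (i + 2)) none
      (PySem.List.pyRange 0 ((remainingWord.length : Int) - 1)).foldl (fun acc2 j =>
        let jsub := PySem.List.slice remainingWord (some j) (some (j + 2))
        if isub == jsub then acc2 + 1 else acc2) acc) 0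
  let repeatWithGapCount : Int :=
    (PySem.List.pyRange 0 (n - 2)).foldl (fun acc i =>
      if PySem.List.pyGet? cs i == PySem.List.pyGet? cs (i + 2) then acc + 1 else acc) 0
  if pairPairsCount != 0 && repeatWithGapCount != 0 then 1 else 0

-- ===== PORT B =====
def validate2_alt (word : String) : Int :=
  let cs := word.toList
  let n : Int := cs.length
  let st :=
    (PySem.List.pyRange 0 (n - 1)).foldl
      (fun (st : PySem.Set (List Char) × Bool × Bool) i =>
        let seen := if 2 ≤ i then PySem.Set.add st.1 (PySem.List.slice cs (some (i - 2)) (some i)) else st.1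
        let hasPair := st.2.1 || PySem.Set.contains seen (PySem.List.slice cs (some i) (some (i + 2)))
        let hasGap := st.2.2 || (decide (i + 2 < n) && (PySem.List.pyGet? cs i == PySem.List.pyGet? cs (i + 2)))
        (seen, hasPair, hasGap))
      (PySem.Set.empty, false, false)
  if st.2.1 && st.2.2 then 1 else 0

-- ===== PRECONDITION & SPEC =====
def Spec_validate2 (word : String) (out : Int) : Prop := out = validate2_alt word
instance (word : String) (out : Int) : Decidable (Spec_validate2 word out) := by unfold Spec_validate2; infer_instance

-- ===== CLAIM (what is proved, stated in full; the proofs are below) =====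
def Claim_equal_validate2 : Prop := ∀ (word : String), Dom_validate2 word → Spec_validate2 word (validate2 word)

-- ===== LEMMAS AND PROOFS =====

def pairAt (cs : List Char) (k : Nat) : List Char := (cs.drop k).take 2

def hasPP (cs : List Char) (m : Nat) : Prop := ∃ k j : Nat, k + 2 ≤ j ∧ j < m ∧ pairAt cs k = pairAt cs j

def hasGR (cs : List Char) (m : Nat) : Prop := ∃ k : Nat, k < m ∧ k + 3 ≤ cs.length ∧ cs[k]? = cs[k + 2]?

theorem pyRange_nil {a b : Int} (h : b ≤ a) : PySem.List.pyRange a b = [] := by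
  rw [List.eq_nil_iff_forall_not_mem]; intro x hx; rw [PySem.List.mem_pyRange_one] at hx; omega

theorem sum_cast_ne_zero {α : Type} (l : List α) (f : α → Nat) :
    ((l.map (fun x => (f x : Int))).sum ≠ 0) ↔ ∃ x ∈ l, f x ≠ 0 := by
  rw [show l.map (fun x => ((f x : Nat) : Int)) = (l.map f).map (fun n : Nat => (n : Int)) by
    simp [List.map_map]]
  rw [show ((l.map f).map (fun n : Nat => (n : Int))).sum = (((l.map f).sum : Nat) : Int) by
    exact_mod_cast (Nat.cast_list_sum (R := Int) (l.map f)).symm]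
  rw [ne_eq, Int.natCast_eq_zero]
  rw [show ((l.map f).sum = 0) = ∀ x ∈ l.map f, x = 0 from propext List.sum_eq_zero_iff]
  simp [not_forall]

theorem countP_ne_zero {α : Type} (l : List α) (p : α → Bool) :
    l.countP p ≠ 0 ↔ ∃ x ∈ l, p x = true := by
  rw [ne_eq, List.countP_eq_zero]; simp [not_forall]

theorem A_pp_char (cs : List Char) :
    ((PySem.List.pyRange 0 ((cs.length : Int) - 1)).foldl (fun acc i =>
      let isub := PySem.List.slice cs (some i) (some (i + 2))
      let remainingWord := PySem.List.slice cs (some (i + 2)) none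
      (PySem.List.pyRange 0 ((remainingWord.length : Int) - 1)).foldl (fun acc2 j =>
        let jsub := PySem.List.slice remainingWord (some j) (some (j + 2))
        if isub == jsub then acc2 + 1 else acc2) acc) (0 : Int)) ≠ 0
    ↔ hasPP cs (cs.length - 1) := by
  simp only [PySem.List.foldl_if_add_one]
  rw [PySem.List.foldl_add]
  rw [zero_add, sum_cast_ne_zero]
  constructor
  · rintro ⟨i, hi, hcount⟩
    rw [PySem.List.mem_pyRange_one] at hi
    obtain ⟨j, hj, hp⟩ := (countP_ne_zero _ _).mp hcount
    rw [PySem.List.mem_pyRange_one] at hj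
    obtain ⟨k, rfl⟩ : ∃ k : Nat, i = (k : Int) := ⟨i.toNat, by omega⟩
    obtain ⟨t, rfl⟩ : ∃ t : Nat, j = (t : Int) := ⟨j.toNat, by omega⟩
    rw [beq_iff_eq] at hp
    have hsl1 : PySem.List.slice cs (some (k : Int)) (some ((k : Int) + 2)) = pairAt cs k := by
      simpa using PySem.List.slice_natCast_add cs k 2
    have hrem : PySem.List.slice cs (some ((k : Int) + 2)) none = cs.drop (k + 2) := by
      simpa using PySem.List.slice_from_natCast cs (k + 2)
    rw [hrem] at hp hj
    have hsl2 : PySem.List.slice (cs.drop (k + 2)) (some (t : Int)) (some ((t : Int) + 2))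
        = pairAt cs (k + 2 + t) := by
      have := PySem.List.slice_natCast_add (cs.drop (k + 2)) t 2
      simpa [pairAt, List.drop_drop, Nat.add_comm] using this
    rw [hsl1, hsl2] at hp
    refine ⟨k, k + 2 + t, by omega, ?_, hp⟩
    simp only [List.length_drop] at hj
    omega
  · rintro ⟨k, j, hkj, hjm, hp⟩
    refine ⟨(k : Int), ?_, ?_⟩
    · rw [PySem.List.mem_pyRange_one]; omega
    · rw [countP_ne_zero]
      refine ⟨((j - (k + 2) : Nat) : Int), ?_, ?_⟩
      · rw [PySem.List.mem_pyRange_one]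
        have hrem : PySem.List.slice cs (some ((k : Int) + 2)) none = cs.drop (k + 2) := by
          simpa using PySem.List.slice_from_natCast cs (k + 2)
        rw [hrem]
        simp only [List.length_drop]
        omega
      · rw [beq_iff_eq]
        have hrem : PySem.List.slice cs (some ((k : Int) + 2)) none = cs.drop (k + 2) := by
          simpa using PySem.List.slice_from_natCast cs (k + 2)
        rw [hrem]
        have hsl1 : PySem.List.slice cs (some (k : Int)) (some ((k : Int) + 2)) = pairAt cs k := by
          simpa using PySem.List.slice_natCast_add cs k 2
        have hsl2 : PySem.List.slice (cs.drop (k + 2)) (some ((j - (k + 2) : Nat) : Int))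
            (some (((j - (k + 2) : Nat) : Int) + 2)) = pairAt cs j := by
          have := PySem.List.slice_natCast_add (cs.drop (k + 2)) (j - (k + 2)) 2
          have hjk : k + 2 + (j - (k + 2)) = j := by omega
          simpa [pairAt, List.drop_drop, Nat.add_comm, hjk] using this
        rw [hsl1, hsl2, hp]

theorem A_gr_char (cs : List Char) :
    ((PySem.List.pyRange 0 ((cs.length : Int) - 2)).foldl (fun acc i =>
      if PySem.List.pyGet? cs i == PySem.List.pyGet? cs (i + 2) then acc + 1 else acc) (0 : Int)) ≠ 0
    ↔ hasGR cs (cs.length - 2) := by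
  rw [PySem.List.foldl_if_add_one, zero_add]
  rw [show ((PySem.List.pyRange 0 ((cs.length : Int) - 2)).countP
        (fun i => PySem.List.pyGet? cs i == PySem.List.pyGet? cs (i + 2)) : Int) ≠ 0
      ↔ (PySem.List.pyRange 0 ((cs.length : Int) - 2)).countP
        (fun i => PySem.List.pyGet? cs i == PySem.List.pyGet? cs (i + 2)) ≠ 0 by
    exact_mod_cast Iff.rfl]
  rw [countP_ne_zero]
  have hg : ∀ k : Nat, PySem.List.pyGet? cs (k : Int) = cs[k]? := fun k => by simp [pysem]
  constructor
  · rintro ⟨i, hi, hp⟩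
    rw [PySem.List.mem_pyRange_one] at hi
    obtain ⟨k, rfl⟩ : ∃ k : Nat, i = (k : Int) := ⟨i.toNat, by omega⟩
    rw [beq_iff_eq, hg k, show ((k : Int) + 2) = ((k + 2 : Nat) : Int) by push_cast; ring, hg (k + 2)] at hp
    exact ⟨k, by omega, by omega, hp⟩
  · rintro ⟨k, hkm, hkl, hp⟩
    refine ⟨(k : Int), by rw [PySem.List.mem_pyRange_one]; omega, ?_⟩
    rw [beq_iff_eq, hg k, show ((k : Int) + 2) = ((k + 2 : Nat) : Int) by push_cast; ring, hg (k + 2), hp]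

def Bstep (cs : List Char) (st : PySem.Set (List Char) × Bool × Bool) (i : Int) :
    PySem.Set (List Char) × Bool × Bool :=
  let seen := if 2 ≤ i then PySem.Set.add st.1 (PySem.List.slice cs (some (i - 2)) (some i)) else st.1
  let hasPair := st.2.1 || PySem.Set.contains seen (PySem.List.slice cs (some i) (some (i + 2)))
  let hasGap := st.2.2 || (decide (i + 2 < (cs.length : Int)) && (PySem.List.pyGet? cs i == PySem.List.pyGet? cs (i + 2)))
  (seen, hasPair, hasGap)

theorem B_loop (cs : List Char) (m : Nat) :
    (∀ x, x ∈ ((PySem.List.pyRange 0 (m : Int)).foldl (Bstep cs) (PySem.Set.empty, false, false)).1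
        ↔ ∃ k : Nat, k + 2 < m ∧ x = pairAt cs k)
    ∧ (((PySem.List.pyRange 0 (m : Int)).foldl (Bstep cs) (PySem.Set.empty, false, false)).2.1 = true
        ↔ hasPP cs m)
    ∧ (((PySem.List.pyRange 0 (m : Int)).foldl (Bstep cs) (PySem.Set.empty, false, false)).2.2 = true
        ↔ hasGR cs m) := by
  induction m with
  | zero =>
    rw [show ((0 : Nat) : Int) = 0 by norm_num, pyRange_nil (le_refl 0)]
    refine ⟨?_, ?_, ?_⟩
    · intro x
      simp only [List.foldl_nil, PySem.Set.empty]
      constructor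
      · intro h; simp at h
      · rintro ⟨k, hk, _⟩; omega
    · simp [List.foldl_nil, hasPP]
    · simp [List.foldl_nil, hasGR]
  | succ m ih =>
    obtain ⟨ih1, ih2, ih3⟩ := ih
    rw [show ((m + 1 : Nat) : Int) = (m : Int) + 1 by push_cast; ring,
        PySem.List.pyRange_one_succ_right (by positivity), List.foldl_append, List.foldl_cons,
        List.foldl_nil]
    set st := (PySem.List.pyRange 0 (m : Int)).foldl (Bstep cs) (PySem.Set.empty, false, false) with hst
    have hpairm : PySem.List.slice cs (some (m : Int)) (some ((m : Int) + 2)) = pairAt cs m := by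
      simpa using PySem.List.slice_natCast_add cs m 2
    have hseen : ∀ x, x ∈ (Bstep cs st (m : Int)).1 ↔ ∃ k : Nat, k + 2 < m + 1 ∧ x = pairAt cs k := by
      intro x
      by_cases h2 : 2 ≤ (m : Int)
      · have hpairm2 : PySem.List.slice cs (some ((m : Int) - 2)) (some (m : Int)) = pairAt cs (m - 2) := by
          have := PySem.List.slice_natCast_add cs (m - 2) 2
          rw [show ((m : Int) - 2) = ((m - 2 : Nat) : Int) by omega,
              show (m : Int) = ((m - 2 : Nat) : Int) + 2 by omega]
          simpa using this
        simp only [Bstep, if_pos h2]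
        rw [PySem.Set.mem_add, ih1, hpairm2]
        constructor
        · rintro (⟨k, hk, rfl⟩ | rfl)
          · exact ⟨k, by omega, rfl⟩
          · exact ⟨m - 2, by omega, rfl⟩
        · rintro ⟨k, hk, rfl⟩
          by_cases hkm : k + 2 < m
          · exact Or.inl ⟨k, hkm, rfl⟩
          · have : k = m - 2 := by omega
            exact Or.inr (by rw [this])
      · simp only [Bstep, if_neg h2]
        rw [ih1]
        constructor
        · rintro ⟨k, hk, rfl⟩; exact ⟨k, by omega, rfl⟩
        · rintro ⟨k, hk, rfl⟩; exact ⟨k, by omega, rfl⟩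
    refine ⟨hseen, ?_, ?_⟩
    · show (st.2.1 || PySem.Set.contains (Bstep cs st (m : Int)).1
          (PySem.List.slice cs (some (m : Int)) (some ((m : Int) + 2)))) = true ↔ hasPP cs (m + 1)
      rw [Bool.or_eq_true, ih2,
          show (PySem.Set.contains (Bstep cs st (m : Int)).1
            (PySem.List.slice cs (some (m : Int)) (some ((m : Int) + 2))) = true)
          ↔ PySem.List.slice cs (some (m : Int)) (some ((m : Int) + 2)) ∈ (Bstep cs st (m : Int)).1 by
            simp [PySem.Set.contains]]
      rw [hpairm, hseen]
      constructor
      · rintro (⟨k, j, hkj, hjm, hp⟩ | ⟨k, hk, hx⟩)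
        · exact ⟨k, j, hkj, by omega, hp⟩
        · exact ⟨k, m, by omega, by omega, hx.symm⟩
      · rintro ⟨k, j, hkj, hjm, hp⟩
        by_cases hjm' : j < m
        · exact Or.inl ⟨k, j, hkj, hjm', hp⟩
        · have : j = m := by omega
          subst this
          exact Or.inr ⟨k, by omega, hp.symm⟩
    · show (st.2.2 || (decide ((m : Int) + 2 < (cs.length : Int)) &&
          (PySem.List.pyGet? cs (m : Int) == PySem.List.pyGet? cs ((m : Int) + 2)))) = true
          ↔ hasGR cs (m + 1)
      rw [Bool.or_eq_true, ih3, Bool.and_eq_true, decide_eq_true_iff, beq_iff_eq]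
      have hg : ∀ k : Nat, PySem.List.pyGet? cs (k : Int) = cs[k]? := fun k => by simp [pysem]
      have h1 : PySem.List.pyGet? cs (m : Int) = cs[m]? := hg m
      have h2 : PySem.List.pyGet? cs ((m : Int) + 2) = cs[m + 2]? := by
        rw [show ((m : Int) + 2) = ((m + 2 : Nat) : Int) by push_cast; ring]; exact hg (m + 2)
      rw [h1, h2]
      constructor
      · rintro (⟨k, hk, hkl, hp⟩ | ⟨hlen, hp⟩)
        · exact ⟨k, by omega, hkl, hp⟩
        · exact ⟨m, by omega, by omega, hp⟩
      · rintro ⟨k, hk, hkl, hp⟩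
        by_cases hkm : k < m
        · exact Or.inl ⟨k, hkm, hkl, hp⟩
        · have : k = m := by omega
          subst this
          exact Or.inr ⟨by omega, hp⟩

theorem hasGR_shift (cs : List Char) : hasGR cs (cs.length - 2) ↔ hasGR cs (cs.length - 1) := by
  unfold hasGR
  constructor <;> rintro ⟨k, h1, h2, h3⟩ <;> exact ⟨k, by omega, h2, h3⟩

theorem validate2_eq (word : String) : validate2 word = validate2_alt word := by
  simp only [validate2, validate2_alt]
  set cs := word.toList with hcs
  have hfun : (fun (st : PySem.Set (List Char) × Bool × Bool) (i : Int) =>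
        let seen := if 2 ≤ i then PySem.Set.add st.1 (PySem.List.slice cs (some (i - 2)) (some i)) else st.1
        let hasPair := st.2.1 || PySem.Set.contains seen (PySem.List.slice cs (some i) (some (i + 2)))
        let hasGap := st.2.2 || (decide (i + 2 < (cs.length : Int)) && (PySem.List.pyGet? cs i == PySem.List.pyGet? cs (i + 2)))
        (seen, hasPair, hasGap)) = Bstep cs := rfl
  rw [hfun]
  by_cases h0 : cs.length = 0
  · rw [h0]
    rw [show (((0 : Nat) : Int) - 1) = -1 by norm_num, show (((0 : Nat) : Int) - 2) = -2 by norm_num,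
        pyRange_nil (by norm_num : (-1 : Int) ≤ 0), pyRange_nil (by norm_num : (-2 : Int) ≤ 0)]
    norm_num
  · have e1 : ((cs.length : Int) - 1) = ((cs.length - 1 : Nat) : Int) := by omega
    rw [e1]
    refine if_congr ?_ rfl rfl
    simp only [Bool.and_eq_true, bne_iff_ne]
    rw [(B_loop cs (cs.length - 1)).2.1, (B_loop cs (cs.length - 1)).2.2, ← e1,
        A_pp_char cs, A_gr_char cs, hasGR_shift cs]

-- ===== VERDICT (by name: the statement is the Claim_ definition above) =====
theorem validate2_spec : Claim_equal_validate2 := by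
  intro word _
  show validate2 word = validate2_alt word
  exact validate2_eq word
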